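-- pv_equiv track=rewrite | github.com/angelrt-alt/MiprimerRepositorio | lab.ejercico7semana11/ejercicio7.py | transformar_texto
-- ===== SOURCE A (Python) =====
-- def transformar_texto(texto, operaciones):
--     for op in operaciones:
--         if op == 1:
--             texto = texto.upper()
--         elif op == 2:
--             texto = texto[::-1]
--         elif op == 3:
--             texto = texto.replace(" ", "")
--     return texto
--     resultado = transformar_texto("Hola mundo", [1, 2, 3])
-- ===== SOURCE B (Python) =====
-- def transformar_texto(texto, operaciones):
--     # One pass over the operations to compute the net effect, then apply it once:
--     # upper and space-removal are idempotent, reversal self-cancels, and all three commute.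
--     up = rev = strip = False
--     for op in operaciones:
--         if op == 1:
--             up = True
--         elif op == 2:
--             rev = not rev
--         elif op == 3:
--             strip = True
--     if up:
--         texto = texto.upper()
--     if strip:
--         texto = ''.join(c for c in texto if c != ' ')
--     if rev:
--         texto = texto[::-1]
--     return texto
-- ===== Notes on version B (the rewrite author's own statement) =====
-- stated objective: alternative
-- what changed: Instead of rewriting the string once per operation, B folds the operation list into three flags (upper applied, reverse parity, spaces stripped) in one pass and applies the net transformation to the string once, exploiting that the three transforms commute and upper/strip are idempotent.
import Mathlib
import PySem

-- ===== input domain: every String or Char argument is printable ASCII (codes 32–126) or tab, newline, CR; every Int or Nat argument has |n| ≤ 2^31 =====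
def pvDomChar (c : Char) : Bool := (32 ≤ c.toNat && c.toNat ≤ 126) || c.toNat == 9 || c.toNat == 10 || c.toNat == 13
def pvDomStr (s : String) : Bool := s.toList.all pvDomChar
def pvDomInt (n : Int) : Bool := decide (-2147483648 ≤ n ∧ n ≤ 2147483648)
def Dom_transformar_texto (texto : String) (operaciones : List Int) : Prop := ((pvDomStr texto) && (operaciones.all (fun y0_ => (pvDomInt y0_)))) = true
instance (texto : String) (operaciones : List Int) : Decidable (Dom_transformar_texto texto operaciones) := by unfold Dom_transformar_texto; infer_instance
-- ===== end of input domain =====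

-- B replaces A's per-operation rewriting of the string by a one-pass fold of the operations
-- into three flags followed by a single application of the net transform (objective: alternative).

-- ===== PORT A =====
def transformar_texto (texto : String) (operaciones : List Int) : String :=
  operaciones.foldl (fun t op =>
    if op = 1 then PySem.Str.upper t
    else if op = 2 then
      -- texto[::-1]: step -1 ≠ 0, so Python never raises here and slice? is always `some`
      (PySem.Str.slice? t none none (-1)).getD t
    else if op = 3 then PySem.Str.replace t " " ""
    else t) texto

-- ===== PORT B =====
def transformar_texto_alt (texto : String) (operaciones : List Int) : String :=
  let flags := operaciones.foldl (fun (f : Bool × Bool × Bool) op =>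
    if op = 1 then (true, f.2.1, f.2.2)
    else if op = 2 then (f.1, !f.2.1, f.2.2)
    else if op = 3 then (f.1, f.2.1, true)
    else f) (false, false, false)
  let cs0 := texto.toList
  let cs1 := if flags.1 then PySem.Chars.upper cs0 else cs0
  let cs2 := if flags.2.2 then cs1.filter (fun c => c ≠ ' ') else cs1
  let cs3 := if flags.2.1 then cs2.reverse else cs2
  String.ofList cs3

-- ===== PRECONDITION & SPEC =====
def Spec_transformar_texto (texto : String) (operaciones : List Int) (out : String) : Prop := out = transformar_texto_alt texto operaciones
instance (texto : String) (operaciones : List Int) (out : String) : Decidable (Spec_transformar_texto texto operaciones out) := by unfold Spec_transformar_texto; infer_instance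

-- ===== CLAIM (what is proved, stated in full; the proofs are below) =====
def Claim_equal_transformar_texto : Prop := ∀ (texto : String) (operaciones : List Int), Dom_transformar_texto texto operaciones → Spec_transformar_texto texto operaciones (transformar_texto texto operaciones)

-- ===== LEMMAS AND PROOFS =====

-- A's per-operation step, on the character-list side
def pvStepA (t : List Char) (op : Int) : List Char :=
  if op = 1 then PySem.Chars.upper t
  else if op = 2 then t.reverse
  else if op = 3 then PySem.Chars.replace t [' '] []
  else t

-- B's flag update (definitionally equal to the lambda inside transformar_texto_alt)
def pvStepF (f : Bool × Bool × Bool) (op : Int) : Bool × Bool × Bool :=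
  if op = 1 then (true, f.2.1, f.2.2)
  else if op = 2 then (f.1, !f.2.1, f.2.2)
  else if op = 3 then (f.1, f.2.1, true)
  else f

-- the net transform named by a flag triple
def pvN (cs : List Char) (f : Bool × Bool × Bool) : List Char :=
  let c1 := if f.1 then PySem.Chars.upper cs else cs
  let c2 := if f.2.2 then c1.filter (fun c => !decide (c = ' ')) else c1
  if f.2.1 then c2.reverse else c2

theorem pv_toNat_ofNat (n : Nat) (h : n < 55296) : (Char.ofNat n).toNat = n := by
  unfold Char.ofNat; simp [Char.ofNatAux, Nat.isValidChar, h]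

theorem pv_islower_toNat (c : Char) : PySem.Chars.islower c = true ↔ 97 ≤ c.toNat ∧ c.toNat ≤ 122 := by
  simp [PySem.Chars.islower, Char.le_def]
  constructor
  · rintro ⟨h1, h2⟩; exact ⟨by exact_mod_cast h1, by exact_mod_cast h2⟩
  · rintro ⟨h1, h2⟩; exact ⟨by exact_mod_cast h1, by exact_mod_cast h2⟩

theorem pv_upperChar_toNat (c : Char) (h : PySem.Chars.islower c = true) :
    (PySem.Chars.upperChar c).toNat = c.toNat - 32 := by
  simp [PySem.Chars.upperChar, h]
  have hc : 97 ≤ c.toNat ∧ c.toNat ≤ 122 := (pv_islower_toNat c).mp h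
  exact pv_toNat_ofNat _ (by omega)

theorem pv_upperChar_of_not_islower (c : Char) (h : PySem.Chars.islower c = false) :
    PySem.Chars.upperChar c = c := by simp [PySem.Chars.upperChar, h]

theorem pv_upperChar_idem (c : Char) :
    PySem.Chars.upperChar (PySem.Chars.upperChar c) = PySem.Chars.upperChar c := by
  by_cases h : PySem.Chars.islower c = true
  · apply pv_upperChar_of_not_islower
    rw [Bool.eq_false_iff]
    intro hl
    rw [pv_islower_toNat] at hl
    rw [pv_upperChar_toNat c h] at hl
    rw [pv_islower_toNat] at h
    omega
  · simp only [pv_upperChar_of_not_islower c (by simpa using h)]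

theorem pv_upperChar_eq_space_iff (c : Char) :
    (PySem.Chars.upperChar c = ' ') = (c = ' ') := by
  by_cases h : PySem.Chars.islower c = true
  · simp only [eq_iff_iff]
    constructor
    · intro he
      have h32 := pv_upperChar_toNat c h
      rw [he] at h32
      rw [pv_islower_toNat] at h
      simp at h32
      omega
    · intro he; rw [he] at h; rw [pv_islower_toNat] at h; simp at h
  · simp only [pv_upperChar_of_not_islower c (by simpa using h)]

-- replace with old = " ", new = "" is exactly the space filter
theorem pv_replace_go_filter (l : List Char) : ∀ (acc : List Char) (fuel : Nat), l.length ≤ fuel →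
    PySem.Chars.replace.go [' '] [] fuel l acc = acc.reverse ++ l.filter (fun c => !decide (c = ' ')) := by
  induction l with
  | nil =>
    intro acc fuel _
    cases fuel <;> rw [PySem.Chars.replace.go] <;> simp
  | cons c t ih =>
    intro acc fuel h
    cases fuel with
    | zero => simp at h
    | succ fuel =>
      rw [PySem.Chars.replace.go]
      simp only [List.length_cons] at h
      by_cases hc : c = ' '
      · subst hc
        have hp : ([' '].isPrefixOf (' ' :: t)) = true := by simp [List.isPrefixOf]
        simp only [hp, if_pos, List.length_cons, List.length_nil, List.drop_succ_cons,
          List.drop_zero, List.reverse_nil, List.nil_append]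
        rw [ih acc fuel (by omega)]
        simp
      · have hp : ([' '].isPrefixOf (c :: t)) = false := by
          simp [List.isPrefixOf]; exact fun hh => (hc hh.symm).elim
        simp only [hp, Bool.false_eq_true, if_false]
        rw [ih (c :: acc) fuel (by omega)]
        simp [hc]

theorem pv_replace_filter (l : List Char) :
    PySem.Chars.replace l [' '] [] = l.filter (fun c => !decide (c = ' ')) := by
  rw [PySem.Chars.replace]
  simp [pv_replace_go_filter l [] l.length le_rfl]

theorem pv_map_filter (l : List Char) :
    (l.filter (fun c => !decide (c = ' '))).map PySem.Chars.upperChar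
      = (l.map PySem.Chars.upperChar).filter (fun c => !decide (c = ' ')) := by
  induction l with
  | nil => simp
  | cons c t ih =>
    by_cases hc : c = ' '
    · subst hc
      have : PySem.Chars.upperChar ' ' = ' ' := by decide
      simp [this, ih]
    · have h2 : ¬ PySem.Chars.upperChar c = ' ' := by rw [pv_upperChar_eq_space_iff]; exact hc
      simp [hc, h2, ih]

-- each A-step acts on a normal form by updating the flags
theorem pv_stepA_N (cs : List Char) (f : Bool × Bool × Bool) (op : Int) :
    pvStepA (pvN cs f) op = pvN cs (pvStepF f op) := by
  obtain ⟨u, r, s⟩ := f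
  unfold pvStepA pvStepF pvN
  by_cases h1 : op = 1
  · simp only [h1, if_true]
    cases u <;> cases r <;> cases s <;>
      simp [PySem.Chars.upper, List.map_reverse, pv_map_filter, List.map_map,
            Function.comp_def, pv_upperChar_idem]
  · by_cases h2 : op = 2
    · simp only [h2, reduceIte]
      cases r <;> simp
    · by_cases h3 : op = 3
      · simp only [h3, reduceIte]
        cases r <;> cases s <;>
          simp [pv_replace_filter, List.filter_reverse, List.filter_filter]
      · simp [h1, h2, h3]

theorem pv_foldA_N (ops : List Int) (cs : List Char) (f : Bool × Bool × Bool) :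
    ops.foldl pvStepA (pvN cs f) = pvN cs (ops.foldl pvStepF f) := by
  induction ops generalizing f with
  | nil => rfl
  | cons op ops ih =>
    simp only [List.foldl_cons, pv_stepA_N, ih]

theorem pv_A_toList (texto : String) (ops : List Int) :
    (transformar_texto texto ops).toList = ops.foldl pvStepA texto.toList := by
  unfold transformar_texto
  induction ops generalizing texto with
  | nil => rfl
  | cons op ops ih =>
    simp only [List.foldl_cons]
    rw [ih]
    congr 1
    unfold pvStepA
    by_cases h1 : op = 1
    · simp [h1]
    · by_cases h2 : op = 2
      · simp [h2, PySem.Str.slice?_none_none_neg_one]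
      · by_cases h3 : op = 3
        · simp only [h3, reduceIte]
          have hsp : (" " : String).toList = [' '] := by decide
          have h0 : ("" : String).toList = ([] : List Char) := by decide
          simp [PySem.Str.replace, hsp, h0]
        · simp [h1, h2, h3]

theorem pv_B_toList (texto : String) (ops : List Int) :
    (transformar_texto_alt texto ops).toList =
      pvN texto.toList (ops.foldl pvStepF (false, false, false)) := by
  unfold transformar_texto_alt pvN pvStepF
  simp

-- ===== VERDICT (by name: the statement is the Claim_ definition above) =====
theorem transformar_texto_spec : Claim_equal_transformar_texto := by
  intro texto ops _
  unfold Spec_transformar_texto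
  apply String.toList_inj.mp
  rw [pv_A_toList, pv_B_toList]
  exact pv_foldA_N ops texto.toList (false, false, false)
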